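-- pv_equiv track=rewrite | github.com/deejy/Hard-discs2_GH | Analysis_algorithme/read_distance_bt_2_object.py | delete_useless_content
-- ===== SOURCE A (Python) =====
-- def delete_useless_content(list):
--     """
--     this function get the list from read_content() and delete the useless
--     information needed to  calculate the distance between two objects.
--     parameters :
--         list : list from read_content()
--     Return :
--         list_cleaned : the same list but with only the information (position of each objects) to calculate distance between two proteins.
--     """
--     line_index = 0
--     list_cleaned = []
--     for line in list:
--         line_index += 1
--         if line_index > 3 :
--             list_cleaned.append(line)
--         if line_index  == 5 :
--             line_index = 0
--     return list_cleaned
-- ===== SOURCE B (Python) =====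
-- def delete_useless_content(list):
--     result = []
--     for i in range(0, len(list), 5):
--         result.extend(list[i+3:i+5])
--     return result
-- ===== Notes on version B (the rewrite author's own statement) =====
-- stated objective: alternative
-- what changed: Replaces the per-line running counter with its manual reset at 5 by a stride loop over the group start indices 0,5,10,... that extends the output with the list[i+3:i+5] slice of each group.
import Mathlib
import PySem

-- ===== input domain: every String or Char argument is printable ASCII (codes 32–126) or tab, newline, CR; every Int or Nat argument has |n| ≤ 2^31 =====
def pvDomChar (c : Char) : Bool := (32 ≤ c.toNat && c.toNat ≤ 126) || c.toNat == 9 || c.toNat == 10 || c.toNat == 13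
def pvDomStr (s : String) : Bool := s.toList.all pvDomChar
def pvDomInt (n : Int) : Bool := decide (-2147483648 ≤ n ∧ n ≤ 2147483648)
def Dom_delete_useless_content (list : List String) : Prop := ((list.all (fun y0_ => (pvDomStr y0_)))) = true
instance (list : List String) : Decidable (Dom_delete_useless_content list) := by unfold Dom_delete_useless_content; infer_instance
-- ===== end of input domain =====

-- ===== PORT A =====
-- B replaces A's per-line running counter (reset at 5) by a stride loop over the group
-- start indices 0,5,10,... that appends the list[i+3:i+5] slice of each group: a different decomposition.
def delete_useless_content (list : List String) : List String :=
  (list.foldl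
    (fun (st : Int × List String) line =>
      let line_index := st.1 + 1
      let list_cleaned := if line_index > 3 then st.2 ++ [line] else st.2
      ((if line_index = 5 then 0 else line_index), list_cleaned))
    ((0 : Int), ([] : List String))).2

-- ===== PORT B =====
-- for i in range(0, len(list), 5): result.extend(list[i+3:i+5])
def delete_useless_content_alt (list : List String) : List String :=
  (PySem.List.pyRange 0 (list.length : Int) 5).foldl
    (fun result i => result ++ PySem.List.slice list (some (i + 3)) (some (i + 5))) []

-- ===== PRECONDITION & SPEC =====
def Spec_delete_useless_content (list : List String) (out : List String) : Prop := out = delete_useless_content_alt list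
instance (list : List String) (out : List String) : Decidable (Spec_delete_useless_content list out) := by unfold Spec_delete_useless_content; infer_instance

-- ===== CLAIM (what is proved, stated in full; the proofs are below) =====
def Claim_equal_delete_useless_content : Prop := ∀ (list : List String), Dom_delete_useless_content list → Spec_delete_useless_content list (delete_useless_content list)

-- ===== LEMMAS AND PROOFS =====

-- proof-side common shape: consume the list five lines at a time, keeping lines 4-5 of each group
def pvChunks : List String → List String → List String
  | [], acc => acc
  | x :: xs, acc => pvChunks (xs.drop 4) (acc ++ ((x :: xs).drop 3).take 2)
  termination_by l _ => l.length
  decreasing_by simp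

lemma pvChunks_nil (acc : List String) : pvChunks [] acc = acc := by rw [pvChunks.eq_def]

lemma pvChunks_cons (x : String) (xs acc : List String) :
    pvChunks (x :: xs) acc = pvChunks (xs.drop 4) (acc ++ ((x :: xs).drop 3).take 2) := by
  rw [pvChunks.eq_def]

lemma pv_main_A : ∀ (n : Nat) (l acc : List String), l.length ≤ n →
    (l.foldl
      (fun (st : Int × List String) line =>
        let line_index := st.1 + 1
        let list_cleaned := if line_index > 3 then st.2 ++ [line] else st.2
        ((if line_index = 5 then 0 else line_index), list_cleaned))
      ((0 : Int), acc)).2 = pvChunks l acc := by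
  intro n
  induction n with
  | zero =>
    intro l acc h
    have : l = [] := List.eq_nil_of_length_eq_zero (Nat.le_zero.mp h)
    subst this; simp [pvChunks_nil]
  | succ n ih =>
    intro l acc h
    match l with
    | [] => simp [pvChunks_nil]
    | [a] => simp [pvChunks_cons, pvChunks_nil]
    | [a, b] => simp [pvChunks_cons, pvChunks_nil]
    | [a, b, c] => simp [pvChunks_cons, pvChunks_nil]
    | [a, b, c, d] => simp [pvChunks_cons, pvChunks_nil]
    | a :: b :: c :: d :: e :: rest =>
      rw [pvChunks_cons]
      have hlen : rest.length ≤ n := by simp at h; omega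
      have := ih rest (acc ++ [d, e]) hlen
      simp only [List.foldl_cons]
      norm_num
      convert this using 2 <;> simp

lemma pvRange5_nil (a b : Int) (h : b ≤ a) : PySem.List.pyRange a b 5 = [] := by
  rw [PySem.List.pyRange_of_pos _ _ (by omega : (0:Int) < 5), if_neg (by omega)]
  simp

lemma pvRange5_cons (a b : Int) (h : a < b) :
    PySem.List.pyRange a b 5 = a :: PySem.List.pyRange (a + 5) b 5 := by
  rw [PySem.List.pyRange_of_pos _ _ (by omega : (0:Int) < 5),
      PySem.List.pyRange_of_pos _ _ (by omega : (0:Int) < 5), if_pos h]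
  have hN : ((b - a + 5 - 1) / 5).toNat
      = (if a + 5 < b then ((b - (a + 5) + 5 - 1) / 5).toNat else 0) + 1 := by
    split_ifs with h2 <;> omega
  rw [hN, List.range_succ_eq_map]
  simp only [List.map_cons, List.map_map, Function.comp_def]
  congr 1
  · norm_num
  · apply List.map_congr_left; intro k _; push_cast; ring

lemma pv_main_B (L : List String) : ∀ (n m : Nat) (acc : List String), L.length - m ≤ n →
    (PySem.List.pyRange (m : Int) (L.length : Int) 5).foldl
      (fun result i => result ++ PySem.List.slice L (some (i + 3)) (some (i + 5))) acc
    = pvChunks (L.drop m) acc := by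
  intro n
  induction n with
  | zero =>
    intro m acc h
    have hm : L.length ≤ m := by omega
    rw [pvRange5_nil _ _ (by exact_mod_cast hm), List.drop_eq_nil_of_le hm, pvChunks_nil]
    rfl
  | succ n ih =>
    intro m acc h
    rcases Nat.lt_or_ge m L.length with hm | hm'
    case inr =>
      rw [pvRange5_nil _ _ (by exact_mod_cast hm'), List.drop_eq_nil_of_le hm', pvChunks_nil]
      rfl
    case inl =>
      rw [pvRange5_cons _ _ (by exact_mod_cast hm), List.foldl_cons]
      have hsl : PySem.List.slice L (some ((m : Int) + 3)) (some ((m : Int) + 5))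
          = ((L.drop m).drop 3).take 2 := by
        rw [PySem.List.slice_toNat _ (by omega : (0:Int) ≤ (m : Int) + 3)
              (by omega : (0:Int) ≤ (m : Int) + 5)]
        have h3 : ((m : Int) + 3).toNat = m + 3 := by omega
        have h5 : ((m : Int) + 5).toNat = m + 5 := by omega
        rw [h3, h5, List.drop_drop]
        congr 1
        omega
      obtain ⟨x, xs, hx⟩ : ∃ x xs, L.drop m = x :: xs := by
        rcases hd : L.drop m with _ | ⟨x, xs⟩
        · exfalso; have := List.drop_eq_nil_iff.mp hd; omega
        · exact ⟨x, xs, rfl⟩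
      have hx5 : L.drop (m + 5) = xs.drop 4 := by
        have h15 : L.drop (m + 5) = ((L.drop m).drop 1).drop 4 := by
          rw [List.drop_drop, List.drop_drop]
        rw [h15, hx]; simp
      have hcast : (m : Int) + 5 = ((m + 5 : Nat) : Int) := by push_cast; ring
      rw [hsl, hx, hcast, ih (m + 5) (acc ++ ((x :: xs).drop 3).take 2) (by omega)]
      rw [hx5, pvChunks_cons]

-- ===== VERDICT (by name: the statement is the Claim_ definition above) =====
theorem delete_useless_content_spec : Claim_equal_delete_useless_content := by
  intro l _
  unfold Spec_delete_useless_content delete_useless_content delete_useless_content_alt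
  rw [pv_main_A l.length l [] le_rfl]
  have := pv_main_B l l.length 0 [] (by omega)
  simpa using this.symm
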